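-- pv_equiv track=rewrite | github.com/stefanyri/satellites_project | allocation.py | update_antenna
-- ===== SOURCE A (Python) =====
-- def update_antenna(best_path, antenna, satellite_num):
--     for node_index in range(len(best_path)):
--         if node_index == 0 or node_index == len(best_path)-1:
--             if best_path[node_index] < satellite_num:
--                 antenna[best_path[node_index]] -= 1
--         else:
--             if best_path[node_index] < satellite_num:
--                 antenna[best_path[node_index]] -= 2
--     return antenna
-- ===== SOURCE B (Python) =====
-- def update_antenna(best_path, antenna, satellite_num):
--     # Two uniform passes: every path node loses 1 antenna, interior nodes lose 1 more.
--     for v in best_path: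
--         if v < satellite_num:
--             antenna[v] -= 1
--     for v in best_path[1:-1]:
--         if v < satellite_num:
--             antenna[v] -= 1
--     return antenna
-- ===== Notes on version B (the rewrite author's own statement) =====
-- stated objective: simpler
-- what changed: Replaces the single indexed loop that branches on endpoint-vs-interior position with two uniform value passes: decrement every path node once, then decrement the interior slice best_path[1:-1] once more; no index arithmetic or branching on position remains.
import Mathlib
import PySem

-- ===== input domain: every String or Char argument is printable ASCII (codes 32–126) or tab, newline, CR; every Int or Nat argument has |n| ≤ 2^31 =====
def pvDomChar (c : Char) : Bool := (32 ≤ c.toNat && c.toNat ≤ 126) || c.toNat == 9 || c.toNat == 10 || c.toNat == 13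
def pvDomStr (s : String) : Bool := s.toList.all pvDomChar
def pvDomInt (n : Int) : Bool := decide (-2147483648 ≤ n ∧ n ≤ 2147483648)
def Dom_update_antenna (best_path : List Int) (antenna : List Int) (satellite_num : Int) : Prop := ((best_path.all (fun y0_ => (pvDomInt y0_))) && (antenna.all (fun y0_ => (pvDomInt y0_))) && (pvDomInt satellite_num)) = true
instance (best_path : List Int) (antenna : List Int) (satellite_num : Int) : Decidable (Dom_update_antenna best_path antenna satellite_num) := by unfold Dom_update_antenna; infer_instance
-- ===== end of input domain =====

-- B replaces A's single position-branching indexed loop by two uniform passes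
-- (decrement all nodes, then the interior slice again); same return value, and
-- B performs the same in-place mutation of antenna as A.

-- ===== PORT A =====
def update_antenna (best_path : List Int) (antenna : List Int) (satellite_num : Int) : List Int :=
  (PySem.List.pyRange 0 best_path.length 1).foldl (fun acc node_index =>
    if node_index = 0 ∨ node_index = (best_path.length : Int) - 1 then
      if PySem.List.pyGetD best_path node_index 0 < satellite_num then
        PySem.List.pySetD acc (PySem.List.pyGetD best_path node_index 0)
          (PySem.List.pyGetD acc (PySem.List.pyGetD best_path node_index 0) 0 - 1)
      else acc
    else
      if PySem.List.pyGetD best_path node_index 0 < satellite_num then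
        PySem.List.pySetD acc (PySem.List.pyGetD best_path node_index 0)
          (PySem.List.pyGetD acc (PySem.List.pyGetD best_path node_index 0) 0 - 2)
      else acc) antenna

-- ===== PORT B =====
def decB (satellite_num : Int) (acc : List Int) (v : Int) : List Int :=
  if v < satellite_num then PySem.List.pySetD acc v (PySem.List.pyGetD acc v 0 - 1) else acc

def update_antenna_alt (best_path : List Int) (antenna : List Int) (satellite_num : Int) : List Int :=
  let a1 := best_path.foldl (decB satellite_num) antenna
  (PySem.List.slice best_path (some 1) (some (-1))).foldl (decB satellite_num) a1

-- ===== PRECONDITION & SPEC =====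
-- Pre_ excludes exactly the inputs on which Python A raises IndexError: some path
-- node below satellite_num indexes outside antenna (both A and B raise there).
def Pre_update_antenna (best_path : List Int) (antenna : List Int) (satellite_num : Int) : Prop :=
  ∀ v ∈ best_path, v < satellite_num → PySem.Raise.InRange antenna.length v
instance (best_path : List Int) (antenna : List Int) (satellite_num : Int) : Decidable (Pre_update_antenna best_path antenna satellite_num) := by unfold Pre_update_antenna; infer_instance

def pvWitness_update_antenna : List Int × List Int × Int := ([0, 1, 2], [3, 3, 3], 3)

def Spec_update_antenna (best_path : List Int) (antenna : List Int) (satellite_num : Int) (out : List Int) : Prop := out = update_antenna_alt best_path antenna satellite_num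
instance (best_path : List Int) (antenna : List Int) (satellite_num : Int) (out : List Int) : Decidable (Spec_update_antenna best_path antenna satellite_num out) := by unfold Spec_update_antenna; infer_instance

-- ===== CLAIM (what is proved, stated in full; the proofs are below) =====
def Claim_equal_update_antenna : Prop := ∀ (best_path : List Int) (antenna : List Int) (satellite_num : Int), Dom_update_antenna best_path antenna satellite_num → Pre_update_antenna best_path antenna satellite_num → Spec_update_antenna best_path antenna satellite_num (update_antenna best_path antenna satellite_num)

-- ===== LEMMAS AND PROOFS =====

-- normalized index: the Nat position Python's possibly-negative index v denotes,
-- or the (out-of-range) position `n` when v is out of range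
def nIdx (n : Nat) (v : Int) : Nat := (PySem.List.pyIdx? n v).getD n

theorem pyIdx?_lt {n : Nat} {v : Int} {j : Nat} (h : PySem.List.pyIdx? n v = some j) : j < n := by
  unfold PySem.List.pyIdx? at h
  split_ifs at h <;> simp_all <;> omega

theorem modify_len {α : Type} (f : α → α) (l : List α) : l.modify l.length f = l := by
  apply List.ext_getElem (by simp)
  intro i h1 h2
  rw [List.getElem_modify]
  simp only [List.length_modify] at h1
  rw [if_neg (by omega)]

theorem modify_comm {α : Type} (f : α → α) (i j : Nat) (l : List α) :
    (l.modify i f).modify j f = (l.modify j f).modify i f := by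
  apply List.ext_getElem (by simp)
  intro k h1 h2
  rw [List.getElem_modify, List.getElem_modify, List.getElem_modify, List.getElem_modify]
  by_cases hij : i = j <;> by_cases hik : i = k <;> by_cases hjk : j = k <;> simp_all

theorem modify_modify_same {α : Type} (f g : α → α) (i : Nat) (l : List α) :
    (l.modify i f).modify i g = l.modify i (fun x => g (f x)) := by
  apply List.ext_getElem (by simp)
  intro k h1 h2
  rw [List.getElem_modify, List.getElem_modify, List.getElem_modify]
  by_cases hik : i = k <;> simp_all

theorem pySetD_getD_eq_modify (a : List Int) (v k : Int) :
    PySem.List.pySetD a v (PySem.List.pyGetD a v 0 - k) = a.modify (nIdx a.length v) (fun x => x - k) := by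
  unfold PySem.List.pySetD PySem.List.pySet? PySem.List.pyGetD PySem.List.pyGet? nIdx
  cases h : PySem.List.pyIdx? a.length v with
  | none => simp [modify_len]
  | some j =>
      have hj := pyIdx?_lt h
      simp only [Option.map_some, Option.getD_some, Option.bind_some]
      apply List.ext_getElem (by simp)
      intro i h1 h2
      rw [List.getElem_modify]
      rw [List.getElem_set]
      by_cases hij : j = i <;> simp_all

theorem decB_eq_modify (s : Int) (a : List Int) (v : Int) :
    decB s a v = if v < s then a.modify (nIdx a.length v) (fun x => x - 1) else a := by
  unfold decB
  split_ifs with h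
  · exact pySetD_getD_eq_modify a v 1
  · rfl

theorem decB_comm (s : Int) (a : List Int) (u v : Int) :
    decB s (decB s a u) v = decB s (decB s a v) u := by
  simp only [decB_eq_modify]
  split_ifs <;> first | rfl | (simp only [List.length_modify]; exact modify_comm _ _ _ _)

theorem dbl (s : Int) (a : List Int) (v : Int) :
    (if v < s then PySem.List.pySetD a v (PySem.List.pyGetD a v 0 - 2) else a) = decB s (decB s a v) v := by
  simp only [decB_eq_modify]
  split_ifs with h
  · simp only [List.length_modify]
    rw [pySetD_getD_eq_modify, modify_modify_same]
    congr 1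
    funext x
    omega
  · rfl

theorem foldl_decB_out (s : Int) (l : List Int) (a : List Int) (y : Int) :
    l.foldl (decB s) (decB s a y) = decB s (l.foldl (decB s) a) y := by
  induction l generalizing a with
  | nil => rfl
  | cons v l ih =>
      simp only [List.foldl_cons]
      rw [decB_comm, ih]

def ddB (s : Int) (a : List Int) (v : Int) : List Int := decB s (decB s a v) v

theorem foldl_ddB (s : Int) (l : List Int) (a : List Int) :
    l.foldl (ddB s) a = l.foldl (decB s) (l.foldl (decB s) a) := by
  induction l generalizing a with
  | nil => rfl
  | cons v l ih =>
      simp only [List.foldl_cons]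
      rw [ih]
      simp only [ddB]
      rw [foldl_decB_out, foldl_decB_out, foldl_decB_out, foldl_decB_out]

def stepA (n : Nat) (s : Int) (acc : List Int) (p : Int × Int) : List Int :=
  if p.1 = 0 ∨ p.1 = (n : Int) - 1 then
    if p.2 < s then PySem.List.pySetD acc p.2 (PySem.List.pyGetD acc p.2 0 - 1) else acc
  else
    if p.2 < s then PySem.List.pySetD acc p.2 (PySem.List.pyGetD acc p.2 0 - 2) else acc

theorem A_enum (best_path antenna : List Int) (s : Int) :
    update_antenna best_path antenna s
      = (PySem.List.enumerate best_path 0).foldl (stepA best_path.length s) antenna := by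
  rw [PySem.List.enumerate_eq_map_pyRange (d := 0), List.foldl_map]
  rfl

theorem foldl_enum_snd (g : List Int → Int → List Int) (l : List Int) (st : Int) (a : List Int) :
    (PySem.List.enumerate l st).foldl (fun acc p => g acc p.2) a = l.foldl g a := by
  have := List.foldl_map (f := fun p : Int × Int => p.2) (g := g)
    (l := PySem.List.enumerate l st) (init := a)
  rw [← this, show (PySem.List.enumerate l st).map (fun p => p.2) = l from PySem.List.map_snd_enumerate l st]

theorem slice_middle (x y : Int) (mid : List Int) :
    PySem.List.slice (x :: mid ++ [y]) (some 1) (some (-1)) = mid := by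
  simp [PySem.List.slice, PySem.List.clampIdx]
  rw [if_neg (by omega : ¬((mid.length : Int) + 1 < 0))]
  simp

theorem main2 (x z : Int) (mid antenna : List Int) (s : Int) :
    update_antenna (x :: mid ++ [z]) antenna s = update_antenna_alt (x :: mid ++ [z]) antenna s := by
  rw [A_enum]
  simp only [PySem.List.enumerate_cons, PySem.List.enumerate_append, PySem.List.enumerate_nil,
    List.foldl_cons, List.foldl_append, List.foldl_nil]
  have hn : ((x :: mid ++ [z]).length : Int) = (mid.length : Int) + 2 := by simp; omega
  have hmid : ∀ (acc : List Int), ∀ p ∈ PySem.List.enumerate mid (0 + 1),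
      stepA (x :: mid ++ [z]).length s acc p = ddB s acc p.2 := by
    intro acc p hp
    obtain ⟨k, hk, rfl⟩ := (PySem.List.mem_enumerate_iff mid (0 + 1) p).mp hp
    unfold stepA
    rw [if_neg (by rw [hn]; push_cast; omega)]
    exact dbl s acc _
  have h0 : stepA (x :: mid ++ [z]).length s antenna (0, x) = decB s antenna x := by
    unfold stepA decB
    rw [if_pos (Or.inl rfl)]
  have hlast : ∀ acc : List Int,
      stepA (x :: mid ++ [z]).length s acc (0 + ((x :: mid).length : Int), z) = decB s acc z := by
    intro acc
    unfold stepA decB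
    rw [if_pos (Or.inr (by rw [hn]; simp; omega))]
  rw [h0, PySem.List.foldl_congr_mem _ _ (fun acc p => ddB s acc p.2) _ hmid, hlast,
    foldl_enum_snd (ddB s) mid (0 + 1)]
  unfold update_antenna_alt
  rw [slice_middle]
  simp only [List.foldl_cons, List.foldl_append, List.foldl_nil]
  simp only [foldl_ddB, foldl_decB_out]

theorem main_eq (best_path antenna : List Int) (s : Int) :
    update_antenna best_path antenna s = update_antenna_alt best_path antenna s := by
  match best_path with
  | [] => rfl
  | [x] =>
      show update_antenna [x] antenna s = update_antenna_alt [x] antenna s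
      rw [A_enum]
      rw [PySem.List.enumerate_cons, PySem.List.enumerate_nil]
      unfold update_antenna_alt stepA decB
      simp [PySem.List.slice, PySem.List.clampIdx]
  | x :: y :: rest =>
      obtain ⟨mid, z, hmz⟩ : ∃ mid z, y :: rest = mid ++ [z] :=
        ⟨(y :: rest).dropLast, (y :: rest).getLast (by simp),
          ((y :: rest).dropLast_concat_getLast (by simp)).symm⟩
      show update_antenna (x :: y :: rest) antenna s = update_antenna_alt (x :: y :: rest) antenna s
      rw [hmz]
      exact main2 x z mid antenna s

-- ===== VERDICT (by name: the statement is the Claim_ definition above) =====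
theorem update_antenna_spec : Claim_equal_update_antenna := by
  intro bp ant s _ _
  unfold Spec_update_antenna
  exact main_eq bp ant s
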